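-- pv_equiv track=rewrite | github.com/mat2ja/napredni-python | kol/K1/kol1.py | mapiraj_intervale
-- ===== SOURCE A (Python) =====
-- def mapiraj_intervale(brojevi):
--     intervali = {}
--
--     for broj in brojevi:
--         prvi = broj[0]
--         duljina = len(broj)
--         start = prvi.ljust(duljina, '0')
--         end = prvi.ljust(duljina, '9')
--         interval = (start, end)
--
--         if interval in intervali:
--             intervali[interval] += 1
--         else:
--             intervali[interval] = 1
--
--     return intervali
-- ===== SOURCE B (Python) =====
-- def mapiraj_intervale(brojevi):
--     # Map each string to its interval key once, then repeatedly split the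
--     # worklist: take the first remaining key, drop its whole equivalence
--     # class in one filter pass, and record the class size from the length
--     # difference.  No counter is maintained during a scan.
--     preostali = [(b[0].ljust(len(b), '0'), b[0].ljust(len(b), '9')) for b in brojevi]
--     rezultat = {}
--     while preostali:
--         k = preostali[0]
--         ostatak = [x for x in preostali if x != k]
--         rezultat[k] = len(preostali) - len(ostatak)
--         preostali = ostatak
--     return rezultat
-- ===== Notes on version B (the rewrite author's own statement) =====
-- stated objective: alternative
-- what changed: Replaces A's single-pass incremental dict tally with a worklist partition: map all strings to keys once, then repeatedly remove the entire equivalence class of the first remaining key in one filter pass, recording each class size as a length difference, so no running counter is maintained at all.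
import Mathlib
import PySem

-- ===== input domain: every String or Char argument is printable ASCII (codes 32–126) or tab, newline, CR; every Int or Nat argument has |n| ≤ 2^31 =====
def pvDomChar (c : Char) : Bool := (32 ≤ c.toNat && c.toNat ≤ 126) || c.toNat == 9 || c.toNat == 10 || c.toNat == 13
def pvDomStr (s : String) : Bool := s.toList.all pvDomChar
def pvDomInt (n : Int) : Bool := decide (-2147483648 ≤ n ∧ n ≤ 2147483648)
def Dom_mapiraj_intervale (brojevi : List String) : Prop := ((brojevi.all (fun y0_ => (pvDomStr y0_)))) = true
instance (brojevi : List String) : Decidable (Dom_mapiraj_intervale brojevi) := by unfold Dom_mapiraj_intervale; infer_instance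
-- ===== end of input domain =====

-- B replaces A's incremental dict tally with a worklist partition (remove one whole key class per filter pass) — alternative decomposition, same results.


-- shared helper: s.ljust(w, fill) = s ++ fill * (w - len(s)) — exact port of str.ljust on code points
def pvLjust (cs : List Char) (w : Nat) (fill : Char) : List Char :=
  cs ++ List.replicate (w - cs.length) fill

-- shared helper: the interval key (start, end) both Pythons compute for one string
-- (broj[0] raises IndexError on the empty string — excluded by Pre_; the default char is never read there)
def pvKey (broj : String) : List String :=
  let prvi := PySem.List.pyGetD broj.toList 0 ' '
  let duljina := broj.toList.length
  [String.ofList (pvLjust [prvi] duljina '0'), String.ofList (pvLjust [prvi] duljina '9')]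

-- ===== PORT A =====
def mapiraj_intervale (brojevi : List String) : List (List String × Int) :=
  (brojevi.foldl
    (fun (intervali : PySem.Dict (List String) Int) broj =>
      let interval := pvKey broj
      if intervali.contains interval then
        intervali.insert interval (intervali.getD interval 0 + 1)
      else
        intervali.insert interval 1)
    PySem.Dict.empty).items

-- ===== PORT B =====
-- the while-loop of Source B: take the first remaining key, filter out its whole class,
-- record the class size as the length difference
def pvPartition (rezultat : PySem.Dict (List String) Int) (preostali : List (List String)) :
    PySem.Dict (List String) Int :=
  match preostali with
  | [] => rezultat
  | k :: t =>
    let ostatak := (k :: t).filter (fun x => x != k)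
    pvPartition (rezultat.insert k (((k :: t).length : Int) - (ostatak.length : Int))) ostatak
termination_by preostali.length
decreasing_by
  simp only [List.filter_cons, bne_self_eq_false, Bool.false_eq_true, if_false, List.length_cons]
  have := List.length_filter_le (fun x => x != k) t
  omega

def mapiraj_intervale_alt (brojevi : List String) : List (List String × Int) :=
  let preostali := brojevi.map pvKey
  (pvPartition PySem.Dict.empty preostali).items

-- ===== PRECONDITION & SPEC =====
-- Pre_ excludes exactly the inputs containing an empty string, where Python A raises IndexError on broj[0].
def Pre_mapiraj_intervale (brojevi : List String) : Prop := ∀ s ∈ brojevi, s ≠ ""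
instance (brojevi : List String) : Decidable (Pre_mapiraj_intervale brojevi) := by unfold Pre_mapiraj_intervale; infer_instance
def pvWitness_mapiraj_intervale : List String := ["12", "19", "7", "145", "12"]

def Spec_mapiraj_intervale (brojevi : List String) (out : List (List String × Int)) : Prop := out = mapiraj_intervale_alt brojevi
instance (brojevi : List String) (out : List (List String × Int)) : Decidable (Spec_mapiraj_intervale brojevi out) := by unfold Spec_mapiraj_intervale; infer_instance

-- ===== CLAIM (what is proved, stated in full; the proofs are below) =====
def Claim_equal_mapiraj_intervale : Prop := ∀ (brojevi : List String), Dom_mapiraj_intervale brojevi → Pre_mapiraj_intervale brojevi → Spec_mapiraj_intervale brojevi (mapiraj_intervale brojevi)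

-- ===== LEMMAS AND PROOFS =====
-- A's tally loop is the standard counter fold over the mapped key list
lemma pv_fold_eq (l : List String) (d : PySem.Dict (List String) Int) :
    l.foldl
      (fun (intervali : PySem.Dict (List String) Int) broj =>
        let interval := pvKey broj
        if intervali.contains interval then
          intervali.insert interval (intervali.getD interval 0 + 1)
        else
          intervali.insert interval 1) d
    = (l.map pvKey).foldl (fun d x => d.insert x (d.getD x 0 + 1)) d := by
  induction l generalizing d with
  | nil => rfl
  | cons a t ih =>
      simp only [List.foldl_cons, List.map_cons]
      rw [ih]
      congr 1
      by_cases h : d.contains (pvKey a) = true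
      · simp [h]
      · have h' : d.contains (pvKey a) = false := by simpa using h
        simp [h', PySem.Dict.getD_of_not_contains]

-- PySem.Set.ofList commutes with filter
lemma pv_ofList_filter {α : Type} [BEq α] [LawfulBEq α] (p : α → Bool) (l : List α) :
    PySem.Set.ofList (l.filter p) = (PySem.Set.ofList l).filter p := by
  induction l with
  | nil => rfl
  | cons x xs ih =>
      rw [PySem.Set.ofList_cons]
      by_cases h : p x = true
      · rw [List.filter_cons_of_pos h, PySem.Set.ofList_cons, List.filter_cons_of_pos h]
        unfold PySem.Set.discard
        rw [ih, List.filter_filter, List.filter_filter]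
        exact congrArg _ (List.filter_congr (fun a _ => by rw [Bool.and_comm]))
      · have h' : p x = false := by simpa using h
        rw [List.filter_cons_of_neg (by simp [h']), List.filter_cons_of_neg (by simp [h'])]
        unfold PySem.Set.discard
        rw [ih, List.filter_filter]
        refine List.filter_congr (fun a _ => ?_)
        by_cases hx : a = x
        · subst hx; simp [h']
        · simp [hx]

-- counting survives removal of a different key class
lemma pv_count_filter {α : Type} [BEq α] [LawfulBEq α] (l : List α) (k k' : α) (h : k' ≠ k) :
    (l.filter (fun x => x != k)).count k' = l.count k' := by
  induction l with
  | nil => rfl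
  | cons a t ih =>
      by_cases ha : a = k
      · subst ha
        rw [List.filter_cons_of_neg (by simp)]
        rw [ih, List.count_cons]
        simp [Ne.symm h]
      · rw [List.filter_cons_of_pos (by simp [bne_iff_ne, ha])]
        rw [List.count_cons, List.count_cons, ih]

-- the non-k elements and the k occurrences partition the list's length
lemma pv_countP_bne_add_count {α : Type} [BEq α] [LawfulBEq α] (k : α) (l : List α) :
    l.countP (fun x => x != k) + l.count k = l.length := by
  induction l with
  | nil => rfl
  | cons a t iht =>
      simp only [List.countP_cons, List.count_cons, List.length_cons]
      by_cases ha : a = k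
      · subst ha; simp; omega
      · simp [ha, bne_iff_ne]; omega

-- the partition loop produces exactly the counter's items, appended to the accumulator
lemma pvPartition_items_aux (n : Nat) (d : PySem.Dict (List String) Int)
    (l : List (List String)) (hn : l.length ≤ n)
    (h : ∀ x ∈ l, d.contains x = false) :
    (pvPartition d l).items
      = d.items ++ (PySem.Set.ofList l).map (fun k => (k, (l.count k : Int))) := by
  induction n generalizing d l with
  | zero =>
      have : l = [] := List.eq_nil_of_length_eq_zero (Nat.le_zero.mp hn)
      subst this; simp [pvPartition]
  | succ n ih =>
      match l with
      | [] => simp [pvPartition]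
      | k :: tl =>
        rw [pvPartition]
        set ost := (k :: tl).filter (fun x => x != k) with host'
        have host : ost = tl.filter (fun x => x != k) := by
          simp [host']
        have hkl : d.contains k = false := h k (by simp)
        have hlen : ost.length ≤ n := by
          have := List.length_filter_le (fun x => x != k) tl
          have hn' : tl.length ≤ n := by simpa using Nat.le_of_succ_le_succ hn
          rw [host]; omega
        have hnot : ∀ x ∈ ost, (d.insert k (((k :: tl).length : Int) - (ost.length : Int))).contains x = false := by
          intro x hx
          have hxk : x ≠ k := by
            rw [host] at hx
            simpa [bne_iff_ne] using List.of_mem_filter hx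
          have hxl : d.contains x = false := by
            apply h
            rw [host] at hx
            exact List.mem_cons_of_mem _ (List.mem_of_mem_filter hx)
          rw [PySem.Dict.contains_insert]
          simp [hxk, hxl]
        rw [ih _ _ hlen hnot]
        have hitems : (d.insert k (((k :: tl).length : Int) - (ost.length : Int))).items
            = d.items ++ [(k, ((k :: tl).length : Int) - (ost.length : Int))] := by
          simp [PySem.Dict.insert, hkl]
        rw [hitems, List.append_assoc]
        congr 1
        -- head value is the multiplicity of k
        have hcnt : ((k :: tl).length : Int) - (ost.length : Int) = ((k :: tl).count k : Int) := by
          have h1 : ost.length = tl.countP (fun x => x != k) := by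
            rw [host]
            exact List.countP_eq_length_filter.symm
          have h2 : tl.countP (fun x => x != k) + tl.count k = tl.length :=
            pv_countP_bne_add_count k tl
          have h3 : (k :: tl).count k = tl.count k + 1 := by simp
          have h4 : tl.count k ≤ tl.length := List.count_le_length
          simp only [List.length_cons, h1, h3]
          omega
        have hdisc : (PySem.Set.ofList tl).discard k = PySem.Set.ofList ost := by
          unfold PySem.Set.discard
          rw [host, pv_ofList_filter]
          exact List.filter_congr (fun a _ => by simp [bne])
        have hmap : (PySem.Set.ofList ost).map (fun k' => (k', (ost.count k' : Int)))
            = (PySem.Set.ofList ost).map (fun k' => (k', (((k :: tl).count k' : Nat) : Int))) := by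
          refine List.map_congr_left (fun k' hk' => ?_)
          have hk'ost : k' ∈ ost := by
            simpa [PySem.Set.mem_ofList] using hk'
          have hk'ne : k' ≠ k := by
            rw [host] at hk'ost
            simpa [bne_iff_ne] using List.of_mem_filter hk'ost
          have hce : ost.count k' = (k :: tl).count k' := by
            rw [host, pv_count_filter _ _ _ hk'ne, List.count_cons]
            simp [Ne.symm hk'ne]
          rw [hce]
        rw [PySem.Set.ofList_cons, hdisc, List.map_cons, ← hmap, hcnt]
        simp

-- the partition loop produces exactly the counter's items, appended to the accumulator
lemma pvPartition_items (d : PySem.Dict (List String) Int) (l : List (List String))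
    (h : ∀ x ∈ l, d.contains x = false) :
    (pvPartition d l).items
      = d.items ++ (PySem.Set.ofList l).map (fun k => (k, (l.count k : Int))) :=
  pvPartition_items_aux l.length d l (Nat.le_refl _) h

-- ===== VERDICT (by name: the statement is the Claim_ definition above) =====
theorem mapiraj_intervale_spec : Claim_equal_mapiraj_intervale := by
  intro brojevi _hDom _hPre
  unfold Spec_mapiraj_intervale mapiraj_intervale mapiraj_intervale_alt
  rw [pv_fold_eq, PySem.Dict.foldl_insert_getD_add_one_eq_counter, PySem.Dict.items_counter]
  rw [pvPartition_items _ _ (fun x _ => rfl)]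
  rfl
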